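-- pv_equiv track=rewrite | github.com/ShiroKatsuya/Calista-Research-LLMs-Working-Together-with-Moddel-Context-Protocol-MCP | message_handlers.py | _format_code_block
-- ===== SOURCE A (Python) =====
-- def _format_code_block(text):
--     """Format code blocks properly with syntax highlighting."""
--     if "```" not in text:
--         return text
--
--     # Process code blocks specially
--     result = []
--     parts = text.split("```")
--
--     for i, part in enumerate(parts):
--         if i % 2 == 0:  # Regular text
--             result.append(part)
--         else:  # Code block
--             # Check for language specifier
--             lines = part.split("\n", 1)
--             language = "plain"
--             code = part
--
--             if len(lines) > 1 and lines[0].strip():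
--                 # Has language specifier
--                 language = lines[0].strip()
--                 code = lines[1]
--
--             # Format with special tag marking for later application
--             result.append(f"\n<<<CODE_BLOCK_START:{language}>>>\n{code}\n<<<CODE_BLOCK_END>>>\n")
--
--     return "".join(result)
-- ===== SOURCE B (Python) =====
-- def _format_code_block(text):
--     """Format code blocks properly with syntax highlighting."""
--     if "```" not in text:
--         return text
--
--     # Scan the text fence-pair by fence-pair with str.partition instead of
--     # splitting everything up front and pairing by index parity.
--     out = []
--     rest = text
--     while True:
--         pre, fence, rest = rest.partition("```")
--         out.append(pre)
--         if not fence: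
--             break
--         seg, fence2, rest = rest.partition("```")
--         head, nl, body = seg.partition("\n")
--         if nl and head.strip():
--             out.append(f"\n<<<CODE_BLOCK_START:{head.strip()}>>>\n{body}\n<<<CODE_BLOCK_END>>>\n")
--         else:
--             out.append(f"\n<<<CODE_BLOCK_START:plain>>>\n{seg}\n<<<CODE_BLOCK_END>>>\n")
--         if not fence2:
--             break
--     return "".join(out)
-- ===== Notes on version B (the rewrite author's own statement) =====
-- stated objective: idiomatic
-- what changed: B replaces A's split-everything-on-the-fence-marker-then-pair-by-index-parity loop with a str.partition scan that consumes the text one fence pair at a time, deciding the language with a single partition on the first newline.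
import Mathlib
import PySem

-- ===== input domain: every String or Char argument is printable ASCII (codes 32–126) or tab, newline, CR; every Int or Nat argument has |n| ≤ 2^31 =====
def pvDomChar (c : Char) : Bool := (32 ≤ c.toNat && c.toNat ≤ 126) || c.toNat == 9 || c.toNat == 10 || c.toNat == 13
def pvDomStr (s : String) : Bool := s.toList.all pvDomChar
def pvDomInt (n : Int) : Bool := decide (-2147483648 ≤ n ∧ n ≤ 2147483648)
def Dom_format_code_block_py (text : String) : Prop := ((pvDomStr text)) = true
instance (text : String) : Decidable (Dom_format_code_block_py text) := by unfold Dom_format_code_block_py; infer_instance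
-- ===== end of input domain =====

-- B replaces A's split-on-"```"-then-index-parity loop by a str.partition scan that
-- consumes one fence pair at a time (same return value; objective: idiomatic/alternative).

-- ===== PORT A =====
-- language/code choice for one code-block part: part.split("\n", 1), lines[0].strip()
def pvWrapA (part : List Char) : List Char :=
  let lines := PySem.Chars.splitOnMax part ['\n'] 1
  let lang :=
    if lines.length > 1 && !(PySem.Chars.strip (lines.getD 0 [])).isEmpty
    then PySem.Chars.strip (lines.getD 0 []) else "plain".toList
  let code :=
    if lines.length > 1 && !(PySem.Chars.strip (lines.getD 0 [])).isEmpty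
    then lines.getD 1 [] else part
  "\n<<<CODE_BLOCK_START:".toList ++ lang ++ ">>>\n".toList ++ code ++ "\n<<<CODE_BLOCK_END>>>\n".toList

-- 'for i, part in enumerate(parts)': the loop with its running index and result list
def pvAGo : List (List Char) → Nat → List (List Char) → List (List Char)
  | [], _, res => res
  | p :: ps, i, res => pvAGo ps (i + 1) (res ++ [if i % 2 = 0 then p else pvWrapA p])

def format_code_block_py (text : String) : String :=
  if PySem.Str.isIn "```" text = false then text
  else
    String.ofList (PySem.Chars.join [] (pvAGo (PySem.Chars.splitOn text.toList "```".toList) 0 []))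

-- ===== PORT B =====
-- s.partition(sep), ported by hand (PySem has no partition): exact — Python returns
-- (before, sep, after) with sep = "" when absent; the middle component is the found Bool.
def pvPart (sep : List Char) : List Char → List Char × Bool × List Char
  | [] => ([], false, [])
  | c :: rest =>
    if sep.isPrefixOf (c :: rest) then ([], true, List.drop sep.length (c :: rest))
    else (c :: (pvPart sep rest).1, (pvPart sep rest).2)

theorem pvPart_len (sep l : List Char) : ((pvPart sep l).2.2).length ≤ l.length := by
  induction l with
  | nil => simp [pvPart]
  | cons c rest ih =>
    simp only [pvPart]
    split
    · simp
    · simpa using Nat.le_succ_of_le ih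

theorem pvPart_len_found (sep l : List Char) (hs : sep ≠ [])
    (h : (pvPart sep l).2.1 = true) : (pvPart sep l).2.2.length < l.length := by
  induction l with
  | nil => simp [pvPart] at h
  | cons c rest ih =>
    by_cases hp : sep.isPrefixOf (c :: rest) = true
    · have hle : sep.length ≤ (c :: rest).length :=
        (List.isPrefixOf_iff_prefix.mp hp).length_le
      have hpos : 0 < sep.length := List.length_pos_iff.mpr hs
      simp only [pvPart, if_pos hp, List.length_drop, List.length_cons] at *
      omega
    · simp only [pvPart, if_neg hp] at h ⊢
      have := ih h
      simp only [List.length_cons]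
      omega

-- seg.partition("\n") + head.strip() decide the language; else plain
def pvWrapB (seg : List Char) : List Char :=
  let t := pvPart ['\n'] seg
  if t.2.1 && !(PySem.Chars.strip t.1).isEmpty then
    "\n<<<CODE_BLOCK_START:".toList ++ PySem.Chars.strip t.1 ++ ">>>\n".toList ++ t.2.2 ++ "\n<<<CODE_BLOCK_END>>>\n".toList
  else
    "\n<<<CODE_BLOCK_START:plain>>>\n".toList ++ seg ++ "\n<<<CODE_BLOCK_END>>>\n".toList

-- the while loop: emit text before the next fence, wrap the segment up to the
-- closing fence (or the end), continue after it
def pvBGo (l : List Char) : List Char :=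
  let t := pvPart "```".toList l
  if h : t.2.1 = true then
    let u := pvPart "```".toList t.2.2
    t.1 ++ pvWrapB u.1 ++ (if u.2.1 then pvBGo u.2.2 else [])
  else t.1
termination_by l.length
decreasing_by
  exact Nat.lt_of_le_of_lt (pvPart_len _ _) (pvPart_len_found _ _ (by decide) h)

def format_code_block_py_alt (text : String) : String :=
  if PySem.Str.isIn "```" text = false then text
  else String.ofList (pvBGo text.toList)

-- ===== PRECONDITION & SPEC =====
def Spec_format_code_block_py (text : String) (out : String) : Prop := out = format_code_block_py_alt text
instance (text : String) (out : String) : Decidable (Spec_format_code_block_py text out) := by unfold Spec_format_code_block_py; infer_instance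

-- ===== CLAIM (what is proved, stated in full; the proofs are below) =====
def Claim_equal_format_code_block_py : Prop := ∀ (text : String), Dom_format_code_block_py text → Spec_format_code_block_py text (format_code_block_py text)

-- ===== LEMMAS AND PROOFS =====

-- unfolding lemmas for pvPart
theorem pvPart_nil (sep : List Char) : pvPart sep [] = ([], false, []) := rfl

theorem pvPart_cons_pos (sep : List Char) (c : Char) (rest : List Char)
    (hp : sep.isPrefixOf (c :: rest) = true) :
    pvPart sep (c :: rest) = ([], true, List.drop sep.length (c :: rest)) := by
  simp only [pvPart, hp]; rfl

theorem pvPart_cons_neg (sep : List Char) (c : Char) (rest : List Char)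
    (hp : ¬ sep.isPrefixOf (c :: rest) = true) :
    pvPart sep (c :: rest) = (c :: (pvPart sep rest).1, (pvPart sep rest).2) := by
  simp only [pvPart, if_neg hp]

-- the list of parts text.split("```") produces, phrased through pvPart
def pvParts (l : List Char) : List (List Char) :=
  let t := pvPart "```".toList l
  if h : t.2.1 = true then t.1 :: pvParts t.2.2 else [t.1]
termination_by l.length
decreasing_by
  exact pvPart_len_found _ _ (by decide) h

theorem pvParts_found (l : List Char) (h : (pvPart "```".toList l).2.1 = true) :
    pvParts l = (pvPart "```".toList l).1 :: pvParts (pvPart "```".toList l).2.2 := by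
  rw [pvParts]; simp only [dif_pos h]

theorem pvParts_not_found (l : List Char) (h : ¬ (pvPart "```".toList l).2.1 = true) :
    pvParts l = [(pvPart "```".toList l).1] := by
  rw [pvParts]; simp only [dif_neg h]

-- prepend a prefix to the head of a (nonempty) parts list
def pvGlue (pre : List Char) : List (List Char) → List (List Char)
  | [] => [pre]
  | x :: xs => (pre ++ x) :: xs

mutual
  def pvE : List (List Char) → List Char
    | [] => []
    | p :: ps => p ++ pvO ps
  def pvO : List (List Char) → List Char
    | [] => []
    | c :: ps => pvWrapA c ++ pvE ps
end

theorem pvGlue_nil_parts (l : List Char) : pvGlue [] (pvParts l) = pvParts l := by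
  rw [pvParts]
  split <;> simp [pvGlue]

theorem pvJoin_nil (ps : List (List Char)) : PySem.Chars.join [] ps = ps.flatten := by
  induction ps with
  | nil => simp [PySem.Chars.join, List.intercalate]
  | cons p ps ih =>
    cases ps with
    | nil => simp [PySem.Chars.join, List.intercalate]
    | cons q rest =>
      rw [PySem.Chars.join_cons_cons, ih]
      simp

theorem pvSplitOnGo (fuel : Nat) (l cur : List Char) (acc : List (List Char))
    (h : l.length < fuel) :
    PySem.Chars.splitOn.go "```".toList fuel l cur acc
      = acc.reverse ++ pvGlue cur.reverse (pvParts l) := by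
  induction fuel generalizing l cur acc with
  | zero => omega
  | succ n ih =>
    cases l with
    | nil =>
      rw [PySem.Chars.splitOn.go]
      · rw [pvParts_not_found [] (by simp [pvPart_nil])]
        simp [pvPart_nil, pvGlue]
      · omega
    | cons c rest =>
      rw [PySem.Chars.splitOn.go]
      have h3 : ("```".toList).length = 3 := rfl
      have hc : rest.length + 1 < n + 1 := by simpa using h
      by_cases hp : List.isPrefixOf "```".toList (c :: rest) = true
      · rw [if_pos hp]
        have hlen : (List.drop ("```".toList).length (c :: rest)).length < n := by
          simp only [List.length_drop, List.length_cons, h3]; omega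
        rw [ih _ _ _ hlen]
        rw [pvParts_found (c :: rest) (by rw [pvPart_cons_pos _ _ _ hp]),
            pvPart_cons_pos _ _ _ hp]
        simp only [List.reverse_cons, List.reverse_nil, pvGlue_nil_parts]
        simp [pvGlue]
      · rw [if_neg hp]
        have hlen : rest.length < n := by omega
        rw [ih _ _ _ hlen]
        have hpp := pvPart_cons_neg _ _ _ hp
        by_cases hf : (pvPart "```".toList rest).2.1 = true
        · rw [pvParts_found rest hf,
              pvParts_found (c :: rest) (by rw [hpp]; exact hf), hpp]
          simp [pvGlue, List.append_assoc]
        · rw [pvParts_not_found rest hf,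
              pvParts_not_found (c :: rest) (by rw [hpp]; exact hf), hpp]
          simp [pvGlue, List.append_assoc]

theorem pvSplitOn_eq (l : List Char) :
    PySem.Chars.splitOn l "```".toList = pvParts l := by
  rw [PySem.Chars.splitOn, pvSplitOnGo _ _ _ _ (Nat.lt_succ_self _)]
  simp [pvGlue_nil_parts]

theorem pvAGo_join (ps : List (List Char)) (i : Nat) (res : List (List Char)) :
    PySem.Chars.join [] (pvAGo ps i res)
      = PySem.Chars.join [] res ++ (if i % 2 = 0 then pvE ps else pvO ps) := by
  induction ps generalizing i res with
  | nil => simp [pvAGo, pvE, pvO]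
  | cons p ps ih =>
    rw [pvAGo, ih]
    simp only [pvJoin_nil]
    by_cases hi : i % 2 = 0
    · have h2 : (i + 1) % 2 ≠ 0 := by omega
      simp [hi, h2, pvE]
    · have h2 : (i + 1) % 2 = 0 := by omega
      simp [hi, h2, pvO]

-- splitOnMax with maxsplit exhausted returns the remainder as one piece
theorem pvSM0 (fuel : Nat) (l cur : List Char) (acc : List (List Char)) :
    PySem.Chars.splitOnMax.go ['\n'] fuel 0 l cur acc
      = ((cur.reverse ++ l) :: acc).reverse := by
  cases fuel with
  | zero => rw [PySem.Chars.splitOnMax.go]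
  | succ n =>
    cases l with
    | nil =>
      rw [PySem.Chars.splitOnMax.go]
      · simp
      · omega
    | cons c rest => rw [PySem.Chars.splitOnMax.go]; simp

theorem pvSM1 (fuel : Nat) (l cur : List Char) (acc : List (List Char))
    (h : l.length < fuel) :
    PySem.Chars.splitOnMax.go ['\n'] fuel 1 l cur acc
      = acc.reverse ++
        (if (pvPart ['\n'] l).2.1 then
          [cur.reverse ++ (pvPart ['\n'] l).1, (pvPart ['\n'] l).2.2]
         else [cur.reverse ++ (pvPart ['\n'] l).1]) := by
  induction fuel generalizing l cur acc with
  | zero => omega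
  | succ n ih =>
    cases l with
    | nil =>
      rw [PySem.Chars.splitOnMax.go]
      · simp [pvPart_nil]
      · omega
    | cons c rest =>
      rw [PySem.Chars.splitOnMax.go]
      by_cases hp : List.isPrefixOf ['\n'] (c :: rest) = true
      · simp only [if_neg (by omega : ¬ (1 : Nat) = 0), if_pos hp]
        rw [pvSM0, pvPart_cons_pos _ _ _ hp]
        simp
      · simp only [if_neg (by omega : ¬ (1 : Nat) = 0), if_neg hp]
        have hlen : rest.length < n := by simp at h; omega
        rw [ih _ _ _ hlen, pvPart_cons_neg _ _ _ hp]
        by_cases hf : (pvPart ['\n'] rest).2.1 = true <;> simp [hf]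

theorem pvPart_not_found (sep l : List Char) (h : (pvPart sep l).2.1 = false) :
    (pvPart sep l).1 = l := by
  induction l with
  | nil => simp [pvPart_nil]
  | cons c rest ih =>
    by_cases hp : sep.isPrefixOf (c :: rest) = true
    · rw [pvPart_cons_pos _ _ _ hp] at h; simp at h
    · rw [pvPart_cons_neg _ _ _ hp] at h ⊢
      simp [ih h]

theorem pvWrap_eq (seg : List Char) : pvWrapA seg = pvWrapB seg := by
  rw [pvWrapA, pvWrapB]
  have hsm : PySem.Chars.splitOnMax seg ['\n'] 1
      = (if (pvPart ['\n'] seg).2.1 then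
          [(pvPart ['\n'] seg).1, (pvPart ['\n'] seg).2.2]
         else [(pvPart ['\n'] seg).1]) := by
    rw [PySem.Chars.splitOnMax]
    rw [if_neg (by omega : ¬ (1 : Int) < 0)]
    rw [show (1 : Int).toNat = 1 from rfl]
    rw [pvSM1 _ _ _ _ (Nat.lt_succ_self _)]
    simp
  rw [hsm]
  by_cases hf : (pvPart ['\n'] seg).2.1 = true
  · simp only [hf, if_true]
    by_cases hs2 : PySem.Chars.strip (pvPart ['\n'] seg).1 = [] <;>
      simp [List.getD, hs2]
  · simp only [hf]
    rw [if_neg (by simp [hf])]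
    have h1 := pvPart_not_found ['\n'] seg (by simpa using hf)
    simp [h1, hf]

theorem pvBGo_eq (l : List Char) : pvBGo l = pvE (pvParts l) := by
  induction l using pvBGo.induct with
  | case1 x t h u ih =>
    have h' : (pvPart "```".toList x).2.1 = true := h
    have ih' : pvBGo (pvPart "```".toList (pvPart "```".toList x).2.2).2.2
        = pvE (pvParts (pvPart "```".toList (pvPart "```".toList x).2.2).2.2) := ih
    rw [pvBGo, dif_pos h', pvParts_found x h']
    show (pvPart "```".toList x).1 ++ pvWrapB (pvPart "```".toList (pvPart "```".toList x).2.2).1 ++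
        (if (pvPart "```".toList (pvPart "```".toList x).2.2).2.1 = true then
          pvBGo (pvPart "```".toList (pvPart "```".toList x).2.2).2.2 else [])
      = pvE ((pvPart "```".toList x).1 :: pvParts (pvPart "```".toList x).2.2)
    by_cases hu : (pvPart "```".toList (pvPart "```".toList x).2.2).2.1 = true
    · rw [if_pos hu, pvParts_found _ hu, pvE, pvO, ih', pvWrap_eq, List.append_assoc]
    · rw [if_neg hu, pvParts_not_found _ hu, pvE, pvO, pvE, pvWrap_eq]
      simp
  | case2 x t h =>
    have h' : ¬ (pvPart "```".toList x).2.1 = true := h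
    rw [pvBGo, dif_neg h', pvParts_not_found x h', pvE, pvO, List.append_nil]

-- ===== VERDICT (by name: the statement is the Claim_ definition above) =====
theorem format_code_block_py_spec : Claim_equal_format_code_block_py := by
  intro text _
  unfold Spec_format_code_block_py format_code_block_py format_code_block_py_alt
  by_cases hin : PySem.Chars.isIn "```".toList text.toList = false
  · rw [if_pos (by simpa using hin), if_pos (by simpa using hin)]
  · rw [if_neg (by simpa using hin), if_neg (by simpa using hin)]
    rw [pvSplitOn_eq, pvAGo_join, pvBGo_eq]
    simp
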